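-- pv_equiv track=rewrite | github.com/EimySenrioth/InfoAnalyzer-via-voz | il.py | contar_homonimos
-- ===== SOURCE A (Python) =====
-- def contar_homonimos(tuplas):
--     contador = 0
--     grupos_homonimos = {}
--
--     for tupla in tuplas:
--         nombre_completo = tupla[1]
--
--         if nombre_completo not in grupos_homonimos:
--             grupos_homonimos[nombre_completo] = []
--
--         grupos_homonimos[nombre_completo].append(tupla)
--
--     for grupo, personas in grupos_homonimos.items():
--         if len(personas) > 1:
--             contador += 1
--
--     return contador
-- ===== SOURCE B (Python) =====
-- def contar_homonimos(tuplas):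
--     # Sort a copy by name, then count runs of equal adjacent names longer than 1.
--     ordenadas = sorted(tuplas, key=lambda t: t[1])
--     contador = 0
--     actual = None
--     largo = 0
--     for t in ordenadas:
--         if actual is not None and t[1] == actual:
--             largo += 1
--         else:
--             if largo > 1:
--                 contador += 1
--             actual = t[1]
--             largo = 1
--     if largo > 1:
--         contador += 1
--     return contador
-- ===== Notes on version B (the rewrite author's own statement) =====
-- stated objective: alternative
-- what changed: B replaces A's dict-of-lists grouping plus a second loop over the groups by sort-then-scan: it sorts a copy of the tuples by name and walks it once, counting runs of equal adjacent names whose length exceeds 1.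
import Mathlib
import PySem

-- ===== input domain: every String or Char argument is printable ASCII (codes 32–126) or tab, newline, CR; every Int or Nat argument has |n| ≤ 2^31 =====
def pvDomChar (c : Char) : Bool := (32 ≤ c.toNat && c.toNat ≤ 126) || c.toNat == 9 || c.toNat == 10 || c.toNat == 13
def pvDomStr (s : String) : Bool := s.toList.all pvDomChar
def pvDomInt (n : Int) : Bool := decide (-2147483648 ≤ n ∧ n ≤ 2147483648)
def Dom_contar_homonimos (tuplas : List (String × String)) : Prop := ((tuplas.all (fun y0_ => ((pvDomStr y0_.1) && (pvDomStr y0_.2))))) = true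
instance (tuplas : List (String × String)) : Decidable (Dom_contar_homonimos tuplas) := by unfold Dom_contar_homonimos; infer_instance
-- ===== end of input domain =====

-- B replaces A's dict-of-lists grouping plus second loop by sort-then-scan: sort a copy by
-- name and count runs of equal adjacent names longer than 1 (alternative algorithm).


-- ===== PORT A =====
-- first loop: 'if nombre not in grupos: grupos[nombre] = []' then 'grupos[nombre].append(tupla)'
def contar_homonimos (tuplas : List (String × String)) : Int :=
  let grupos : PySem.Dict String (List (String × String)) :=
    tuplas.foldl (fun d tupla =>
      let nombre := tupla.2
      let d := if d.contains nombre then d else d.insert nombre []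
      d.insert nombre (d.getD nombre [] ++ [tupla])) PySem.Dict.empty
  -- second loop over grupos.items(): 'if len(personas) > 1: contador += 1'
  grupos.items.foldl (fun contador p => if p.2.length > 1 then contador + 1 else contador) 0

-- ===== PORT B =====
-- 'ordenadas = sorted(tuplas, key=lambda t: t[1])', then one scan with state
-- (contador, actual, largo); 'actual is not None and t[1] == actual' is 's.2.1 == some t.2';
-- the last run is finalized after the loop, exactly as in Source B.
def contar_homonimos_alt (tuplas : List (String × String)) : Int :=
  let ordenadas := PySem.List.sorted tuplas (fun t => t.2) false
  let st := ordenadas.foldl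
    (fun (s : Int × Option String × Nat) t =>
      if s.2.1 == some t.2 then (s.1, s.2.1, s.2.2 + 1)
      else ((if 1 < s.2.2 then s.1 + 1 else s.1), some t.2, 1))
    ((0 : Int), (none : Option String), (0 : Nat))
  if 1 < st.2.2 then st.1 + 1 else st.1

-- ===== PRECONDITION & SPEC =====
def Spec_contar_homonimos (tuplas : List (String × String)) (out : Int) : Prop := out = contar_homonimos_alt tuplas
instance (tuplas : List (String × String)) (out : Int) : Decidable (Spec_contar_homonimos tuplas out) := by unfold Spec_contar_homonimos; infer_instance

-- ===== CLAIM (what is proved, stated in full; the proofs are below) =====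
def Claim_equal_contar_homonimos : Prop := ∀ (tuplas : List (String × String)), Dom_contar_homonimos tuplas → Spec_contar_homonimos tuplas (contar_homonimos tuplas)

-- ===== LEMMAS AND PROOFS =====

-- Common characterisation both ports are reduced to: among the distinct names, how many
-- occur more than once.
def pvHom (ns : List String) : Int :=
  ((ns.dedup.countP (fun x => decide (1 < ns.count x)) : Nat) : Int)

-- one step of B's scan, and the post-loop finalization
def pvStep (s : Int × Option String × Nat) (n : String) : Int × Option String × Nat :=
  if s.2.1 == some n then (s.1, s.2.1, s.2.2 + 1)
  else ((if 1 < s.2.2 then s.1 + 1 else s.1), some n, 1)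

def pvFin (s : Int × Option String × Nat) : Int := if 1 < s.2.2 then s.1 + 1 else s.1

-- ---- A-side: the dict-of-lists fold groups by name ----

-- A's build step ('ensure key, then append') is dict.modify with append.
theorem pvBuildStep_eq_modify (d : PySem.Dict String (List (String × String)))
    (tupla : String × String) :
    (let d' := if d.contains tupla.2 then d else d.insert tupla.2 [];
      d'.insert tupla.2 (d'.getD tupla.2 [] ++ [tupla]))
    = d.modify tupla.2 [] (fun x => x ++ [tupla]) := by
  by_cases h : d.contains tupla.2
  · simp [h, PySem.Dict.modify]
  · have hf : d.contains tupla.2 = false := Bool.eq_false_iff.mpr h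
    simp only [hf, Bool.false_eq_true, if_false]
    rw [PySem.Dict.getD_insert_self, PySem.Dict.insert_insert_self]
    simp [PySem.Dict.modify, PySem.Dict.getD_of_not_contains d [] hf]

theorem pvA_char (tuplas : List (String × String)) :
    contar_homonimos tuplas
      = (((PySem.Set.ofList (tuplas.map (fun t => t.2))).countP
            (fun n => decide (1 < (tuplas.map (fun t => t.2)).count n)) : Nat) : Int) := by
  unfold contar_homonimos
  rw [PySem.List.foldl_congr_mem tuplas _ (fun d t => d.modify t.2 [] (fun x => x ++ [t]))
    PySem.Dict.empty (fun acc x _ => pvBuildStep_eq_modify acc x)]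
  set D : PySem.Dict String (List (String × String)) :=
    tuplas.foldl (fun d t => d.modify t.2 [] (fun x => x ++ [t])) PySem.Dict.empty with hD
  have hkeys : D.keys = PySem.Set.ofList (tuplas.map (fun t => t.2)) := by
    rw [hD, PySem.Dict.keys_foldl_modify_key tuplas (fun t => t.2) [] (fun _ t x => x ++ [t])]
    simp [PySem.Dict.keys_empty, PySem.Set.update_nil_left]
  have hnodup : D.keys.Nodup := by rw [hkeys]; exact PySem.Set.nodup_ofList _
  have hget : ∀ k, D.getD k [] = tuplas.filter (fun t => t.2 == k) := by
    intro k
    rw [hD, show tuplas.foldl (fun d t => d.modify t.2 [] (fun x => x ++ [t])) PySem.Dict.empty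
        = (tuplas.map (fun t => (t.2, t))).foldl
            (fun d p => d.modify p.1 [] (fun x => x ++ [p.2])) PySem.Dict.empty
      from by rw [List.foldl_map]]
    rw [PySem.Dict.getD_foldl_modify_append]
    simp [PySem.Dict.getD_empty, List.filter_map, List.map_map, Function.comp_def]
  dsimp only
  rw [PySem.Dict.items_eq_map_keys D hnodup []]
  rw [PySem.List.foldl_ite_add_one (fun p : String × List (String × String) => p.2.length > 1)]
  rw [List.countP_map, hkeys, zero_add]
  congr 1
  apply List.countP_congr
  intro k _
  have hc : (tuplas.map (fun t => t.2)).count k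
      = (tuplas.filter (fun t => t.2 == k)).length := by
    simp [List.count, Function.comp_def, List.countP_eq_length_filter, List.filter_map]
  simp only [Function.comp_def, hc, hget k]

-- ---- B-side: the run scan over the sorted names ----

-- In a sorted list, an element ≤ everything occupies exactly a prefix of copies.
theorem pvPrefix_run (a : String) : ∀ (t : List String), t.Pairwise (· ≤ ·) →
    (∀ x ∈ t, a ≤ x) →
    t = List.replicate (t.count a) a ++ t.filter (fun x => x ≠ a) := by
  intro t
  induction t with
  | nil => intro _ _; simp
  | cons h t ih =>
    intro hp hle
    rcases List.pairwise_cons.mp hp with ⟨hh, ht⟩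
    by_cases hha : h = a
    · subst hha
      simp only [List.count_cons_self, List.replicate_succ, List.cons_append]
      have hfe : (h :: t).filter (fun x => x ≠ h) = t.filter (fun x => x ≠ h) := by simp
      rw [hfe]
      congr 1
      exact ih ht (fun x hx => hh x hx)
    · have hlt : ∀ x ∈ h :: t, a < x := by
        intro x hx
        rw [List.mem_cons] at hx
        rcases hx with rfl | hx
        · exact lt_of_le_of_ne (hle x (by simp)) (fun e => hha e.symm)
        · exact lt_of_lt_of_le (lt_of_le_of_ne (hle h (by simp)) (fun e => hha e.symm)) (hh x hx)
      have hcount : (h :: t).count a = 0 := by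
        rw [List.count_eq_zero]
        intro hmem
        exact absurd rfl (ne_of_gt (hlt a hmem))
      have hfilter : (h :: t).filter (fun x => x ≠ a) = h :: t := by
        apply List.filter_eq_self.mpr
        intro x hx
        simp [ne_of_gt (hlt x hx)]
      rw [hcount, hfilter]
      simp

theorem pvDedup_replicate_append (a : String) (m : Nat) (r : List String) (hr : a ∉ r) :
    (List.replicate (m + 1) a ++ r).dedup = a :: r.dedup := by
  induction m with
  | zero => simp [List.dedup_cons_of_notMem, hr]
  | succ k ihk =>
    rw [List.replicate_succ, List.cons_append, List.dedup_cons_of_mem, ihk]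
    simp [List.mem_append, List.mem_replicate]

-- Peeling one run of copies off the front changes pvHom by 1 exactly when the run is longer than 1.
theorem pvHom_peel (a : String) (m : Nat) (r : List String) (hr : a ∉ r) :
    pvHom (List.replicate m a ++ r) = (if 1 < m then 1 else 0) + pvHom r := by
  unfold pvHom
  have hcnt : ∀ x, (List.replicate m a ++ r).count x
      = (if x = a then m else 0) + r.count x := by
    intro x
    rw [List.count_append, List.count_replicate]
    split_ifs with h1 h2 h3 <;> simp_all
  cases m with
  | zero => simp; rfl
  | succ m' =>
    rw [pvDedup_replicate_append a m' r hr]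
    rw [List.countP_cons]
    have hca : (List.replicate (m'+1) a ++ r).count a = m' + 1 := by
      rw [hcnt]; simp [List.count_eq_zero.mpr hr]
    have hcr : ∀ x ∈ r.dedup, decide (1 < (List.replicate (m'+1) a ++ r).count x)
        = decide (1 < r.count x) := by
      intro x hx
      have hxa : x ≠ a := fun e => hr (e ▸ List.mem_dedup.mp hx)
      rw [hcnt]; simp [hxa]
    rw [List.countP_congr (fun x hx => by rw [hcr x hx]), hca]
    simp only [decide_eq_true_eq]
    split_ifs with h <;> push_cast <;> ring

theorem pvHom_cons_sorted (n : String) (t : List String) (ht : t.Pairwise (· ≤ ·))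
    (hh : ∀ x ∈ t, n ≤ x) :
    pvHom (n :: t)
      = (if 1 < 1 + t.count n then 1 else 0) + pvHom (t.filter (fun x => x ≠ n)) := by
  have hdec : n :: t = List.replicate (t.count n + 1) n ++ t.filter (fun x => x ≠ n) := by
    conv_lhs => rw [show t = List.replicate (t.count n) n ++ t.filter (fun x => x ≠ n)
      from pvPrefix_run n t ht hh]
    rw [List.replicate_succ, List.cons_append]
  rw [hdec, pvHom_peel n (t.count n + 1) _ (by simp)]
  have harith : t.count n + 1 = 1 + t.count n := by omega
  rw [harith]

-- Invariant of B's scan: with a current run of length k ≥ 1 of the minimal name a,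
-- finalizing after scanning the rest yields the run's contribution plus pvHom of the rest.
theorem pvScan_aux : ∀ (ns : List String), ns.Pairwise (· ≤ ·) →
    ∀ (a : String) (k : Nat) (c : Int), 1 ≤ k → (∀ x ∈ ns, a ≤ x) →
    pvFin (ns.foldl pvStep (c, some a, k))
      = c + (if 1 < k + ns.count a then 1 else 0) + pvHom (ns.filter (fun x => x ≠ a)) := by
  intro ns
  induction ns with
  | nil =>
    intro _ a k c hk _
    simp only [List.foldl_nil, List.count_nil, List.filter_nil, Nat.add_zero]
    unfold pvFin pvHom
    simp only [List.dedup_nil, List.countP_nil, Nat.cast_zero, add_zero]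
    split_ifs <;> ring
  | cons n t ih =>
    intro hp a k c hk hle
    rcases List.pairwise_cons.mp hp with ⟨hh, ht⟩
    by_cases hna : n = a
    · subst hna
      have hstep : pvStep (c, some n, k) n = (c, some n, k + 1) := by
        simp [pvStep]
      rw [List.foldl_cons, hstep, ih ht n (k + 1) c (by omega) hh]
      have hfe : (n :: t).filter (fun x => x ≠ n) = t.filter (fun x => x ≠ n) := by simp
      rw [hfe, List.count_cons_self]
      have harith : k + 1 + t.count n = k + (t.count n + 1) := by omega
      rw [harith]
    · have hlt : ∀ x ∈ n :: t, a < x := by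
        intro x hx
        rw [List.mem_cons] at hx
        rcases hx with rfl | hx
        · exact lt_of_le_of_ne (hle x (by simp)) (fun e => hna e.symm)
        · exact lt_of_lt_of_le
            (lt_of_le_of_ne (hle n (by simp)) (fun e => hna e.symm)) (hh x hx)
      have hstep : pvStep (c, some a, k) n
          = ((if 1 < k then c + 1 else c), some n, 1) := by
        have hne : (some a == some n) = false := by
          simp
          exact fun e => hna e.symm
        simp [pvStep, hne]
      rw [List.foldl_cons, hstep, ih ht n 1 _ (by omega) hh]
      have hcount : (n :: t).count a = 0 := by
        rw [List.count_eq_zero]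
        intro hmem
        exact absurd rfl (ne_of_gt (hlt a hmem))
      have hfilter : (n :: t).filter (fun x => x ≠ a) = n :: t := by
        apply List.filter_eq_self.mpr
        intro x hx
        simp [ne_of_gt (hlt x hx)]
      rw [hcount, hfilter, pvHom_cons_sorted n t ht hh]
      split_ifs <;> (try (exfalso; omega)) <;> ring

theorem pvScan_sorted (ns : List String) (h : ns.Pairwise (· ≤ ·)) :
    pvFin (ns.foldl pvStep (0, none, 0)) = pvHom ns := by
  cases ns with
  | nil => simp [pvFin, pvHom]
  | cons n t =>
    rcases List.pairwise_cons.mp h with ⟨hh, ht⟩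
    have hstep : pvStep (0, none, 0) n = (0, some n, 1) := by
      simp [pvStep]
    rw [List.foldl_cons, hstep, pvScan_aux t ht n 1 0 (by omega) hh,
      pvHom_cons_sorted n t ht hh]
    ring

theorem pvB_char (tuplas : List (String × String)) :
    contar_homonimos_alt tuplas
      = (((PySem.Set.ofList (tuplas.map (fun t => t.2))).countP
            (fun n => decide (1 < (tuplas.map (fun t => t.2)).count n)) : Nat) : Int) := by
  unfold contar_homonimos_alt
  set s := PySem.List.sorted tuplas (fun t => t.2) false with hs
  set ns := s.map (fun t => t.2) with hns
  have hfold : s.foldl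
      (fun (st : Int × Option String × Nat) t =>
        if st.2.1 == some t.2 then (st.1, st.2.1, st.2.2 + 1)
        else ((if 1 < st.2.2 then st.1 + 1 else st.1), some t.2, 1))
      ((0 : Int), (none : Option String), (0 : Nat))
      = ns.foldl pvStep (0, none, 0) := by
    rw [hns, List.foldl_map]
    rfl
  show pvFin (s.foldl _ ((0 : Int), (none : Option String), (0 : Nat))) = _
  rw [hfold, pvScan_sorted ns (PySem.List.sorted_map_key_pairwise tuplas (fun t => t.2))]
  -- the scanned sorted names are a permutation of the original names
  have hperm : ns.Perm (tuplas.map (fun t => t.2)) :=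
    (PySem.List.sorted_perm tuplas (fun t => t.2) false).map _
  have hpd : ns.dedup.Perm (PySem.Set.ofList (tuplas.map (fun t => t.2))) := by
    refine (List.perm_ext_iff_of_nodup (List.nodup_dedup ns) (PySem.Set.nodup_ofList _)).mpr ?_
    intro x
    rw [List.mem_dedup, PySem.Set.mem_ofList, hperm.mem_iff]
  unfold pvHom
  congr 1
  rw [hpd.countP_eq]
  apply List.countP_congr
  intro x _
  rw [hperm.count_eq]

-- ===== VERDICT (by name: the statement is the Claim_ definition above) =====
theorem contar_homonimos_spec : Claim_equal_contar_homonimos := by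
  intro tuplas _
  unfold Spec_contar_homonimos
  rw [pvA_char, pvB_char]
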